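-- pv_equiv track=rewrite | github.com/AlexeiASouza/Leitor_Cart-o_Resposta | functions.py | get_resp
-- ===== SOURCE A (Python) =====
-- def get_resp(answer):
--     resp = ''
--     answered  = False
--     for idx,asw in enumerate(answer):
--         if asw == -1:
--             return 'X' #BRANCO
--         elif asw == 0:
--             continue
--         elif asw == 1 and answered == False:
--             answered = True
--             index = idx
--         elif asw == 1 and answered == True:
--             return 'X' #NULL
--
--     if answered == False:
--         return '- ' #BRANCO
--
--     if index == 0:
--         return 'A'
--     elif index == 1:
--         return 'B'
--     elif index == 2:
--         return 'C'
--     elif index == 3: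
--         return 'D'
-- ===== SOURCE B (Python) =====
-- def get_resp(answer):
--     if -1 in answer:
--         return 'X'
--     ones = [i for i, v in enumerate(answer) if v == 1]
--     if len(ones) >= 2:
--         return 'X'
--     if not ones:
--         return '- '
--     return {0: 'A', 1: 'B', 2: 'C', 3: 'D'}.get(ones[0])
-- ===== Notes on version B (the rewrite author's own statement) =====
-- stated objective: simpler
-- what changed: Replaces A's single-pass early-exit state machine (answered flag, per-element returns) with a gather-then-decide decomposition: membership test for -1, one comprehension collecting all indices of 1, then a decision on that list's length with a dict lookup for the letter.
-- outside the precondition, e.g. on get_resp([0, 0, 0, 0, 1]): A returns None, B returns None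
import Mathlib
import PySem

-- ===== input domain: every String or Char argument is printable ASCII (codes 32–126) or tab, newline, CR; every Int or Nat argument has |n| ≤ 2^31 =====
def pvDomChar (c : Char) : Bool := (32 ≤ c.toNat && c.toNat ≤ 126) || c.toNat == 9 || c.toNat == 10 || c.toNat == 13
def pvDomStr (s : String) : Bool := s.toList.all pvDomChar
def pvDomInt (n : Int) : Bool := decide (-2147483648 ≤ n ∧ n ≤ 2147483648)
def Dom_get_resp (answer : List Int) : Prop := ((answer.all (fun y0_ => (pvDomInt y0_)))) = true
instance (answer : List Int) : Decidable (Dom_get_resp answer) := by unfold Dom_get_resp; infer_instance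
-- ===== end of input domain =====

-- B replaces A's single-pass early-exit state machine with gather-then-decide:
-- check for -1, collect all indices of 1 in one pass, then decide on that list (simpler decomposition, same cost).
-- Pre_ excludes inputs where both Pythons return None (no String): no -1, exactly one 1, and it sits at index >= 4.


-- ===== PORT A =====
-- the trailing if/elif chain of A ("" = Python's falling off the end with None; excluded by Pre_)
def respLetter (index : Nat) : String :=
  if index = 0 then "A"
  else if index = 1 then "B"
  else if index = 2 then "C"
  else if index = 3 then "D"
  else ""

-- A's for-loop over enumerate(answer) with its early returns and the answered/index state
def getRespLoop : List Int → Nat → Bool → Nat → String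
  | [], _, answered, index => if answered = false then "- " else respLetter index
  | asw :: rest, idx, answered, index =>
    if asw = -1 then "X"
    else if asw = 0 then getRespLoop rest (idx + 1) answered index
    else if asw = 1 ∧ answered = false then getRespLoop rest (idx + 1) true idx
    else if asw = 1 ∧ answered = true then "X"
    else getRespLoop rest (idx + 1) answered index

def get_resp (answer : List Int) : String := getRespLoop answer 0 false 0

-- ===== PORT B =====
-- the comprehension [i for i, v in enumerate(answer) if v == 1]
def oneIdxs : Nat → List Int → List Nat
  | _, [] => []
  | i, v :: rest => if v = 1 then i :: oneIdxs (i + 1) rest else oneIdxs (i + 1) rest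

-- {0:'A',1:'B',2:'C',3:'D'}.get(i)  (.getD "" = Python's None result, excluded by Pre_)
def letterTable : List (Nat × String) := [(0, "A"), (1, "B"), (2, "C"), (3, "D")]

def get_resp_alt (answer : List Int) : String :=
  if (-1 : Int) ∈ answer then "X"
  else
    let ones := oneIdxs 0 answer
    if 2 ≤ ones.length then "X"
    else if ones = [] then "- "
    else ((letterTable.lookup (ones.headD 0)).getD "")

-- ===== PRECONDITION & SPEC =====
-- Pre_ excludes exactly the inputs on which Python A returns None (not a String): no -1,
-- a single 1, and that 1 not among the first four entries (index ≥ 4).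
def Pre_get_resp (answer : List Int) : Prop :=
  (-1 : Int) ∈ answer ∨ answer.count 1 ≠ 1 ∨ (1 : Int) ∈ answer.take 4
instance (answer : List Int) : Decidable (Pre_get_resp answer) := by unfold Pre_get_resp; infer_instance

def pvWitness_get_resp : List Int := [0, 1, 0]

def Spec_get_resp (answer : List Int) (out : String) : Prop := out = get_resp_alt answer
instance (answer : List Int) (out : String) : Decidable (Spec_get_resp answer out) := by unfold Spec_get_resp; infer_instance

-- ===== CLAIM (what is proved, stated in full; the proofs are below) =====
def Claim_equal_get_resp : Prop := ∀ (answer : List Int), Dom_get_resp answer → Pre_get_resp answer → Spec_get_resp answer (get_resp answer)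

-- ===== LEMMAS AND PROOFS =====

-- the letter table agrees with A's if-chain on every index
lemma lookup_eq_respLetter (i : Nat) :
    ((letterTable.lookup i).getD "") = respLetter i := by
  unfold letterTable respLetter
  match i with
  | 0 => rfl
  | 1 => rfl
  | 2 => rfl
  | 3 => rfl
  | (n+4) => simp [List.lookup]

lemma oneIdxs_nil_iff (j : Nat) (l : List Int) : oneIdxs j l = [] ↔ (1 : Int) ∉ l := by
  induction l generalizing j with
  | nil => simp [oneIdxs]
  | cons a r ih =>
    by_cases h : a = 1
    · simp [oneIdxs, h]
    · have h' : (1 : Int) ≠ a := fun hh => h hh.symm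
      simp [oneIdxs, h, h', ih]

-- answered = true: any later -1 or 1 gives "X", otherwise the stored index decides
lemma getRespLoop_true (l : List Int) (idx j : Nat) :
    getRespLoop l idx true j =
      (if (-1 : Int) ∈ l ∨ (1 : Int) ∈ l then "X" else respLetter j) := by
  induction l generalizing idx with
  | nil => simp [getRespLoop]
  | cons a r ih =>
    by_cases h1 : a = -1
    · simp [getRespLoop, h1]
    · by_cases h0 : a = 0
      · simp [getRespLoop, h0, ih]
      · by_cases hone : a = 1
        · simp [getRespLoop, hone]
        · have ha1 : (-1 : Int) ≠ a := fun hh => h1 hh.symm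
          have ha2 : (1 : Int) ≠ a := fun hh => hone hh.symm
          simp [getRespLoop, h1, h0, hone, ha1, ha2, ih]

-- generalized B-side value for a suffix whose first element has absolute index idx
def altGen (idx : Nat) (l : List Int) : String :=
  if (-1 : Int) ∈ l then "X"
  else
    let ones := oneIdxs idx l
    if 2 ≤ ones.length then "X"
    else if ones = [] then "- "
    else ((letterTable.lookup (ones.headD 0)).getD "")

lemma getRespLoop_false (l : List Int) (idx : Nat) :
    getRespLoop l idx false 0 = altGen idx l := by
  induction l generalizing idx with
  | nil => simp [getRespLoop, altGen, oneIdxs]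
  | cons a r ih =>
    by_cases h1 : a = -1
    · simp [getRespLoop, altGen, h1]
    · have ha1 : (-1 : Int) ≠ a := fun hh => h1 hh.symm
      by_cases h0 : a = 0
      · have hone : a ≠ 1 := by rw [h0]; decide
        rw [show getRespLoop (a :: r) idx false 0 = getRespLoop r (idx + 1) false 0 by
              simp [getRespLoop, h0]]
        rw [ih]
        unfold altGen
        simp [oneIdxs, hone, ha1]
      · by_cases hone : a = 1
        · -- A moves to answered=true with index idx
          rw [show getRespLoop (a :: r) idx false 0 = getRespLoop r (idx + 1) true idx by
                simp [getRespLoop, hone]]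
          rw [getRespLoop_true]
          unfold altGen
          simp only [hone]
          by_cases hm : (-1 : Int) ∈ r
          · simp [hm]
          · by_cases ho : (1 : Int) ∈ r
            · have hne : oneIdxs (idx + 1) r ≠ [] := by
                rw [Ne, oneIdxs_nil_iff]; simpa using ho
              rcases hx : oneIdxs (idx + 1) r with _ | ⟨b, bs⟩
              · exact absurd hx hne
              · simp [hm, ho, oneIdxs, hx]
            · have hz : oneIdxs (idx + 1) r = [] := (oneIdxs_nil_iff _ _).mpr ho
              simp [hm, ho, oneIdxs, hz, lookup_eq_respLetter]
        · -- other value: skipped by both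
          rw [show getRespLoop (a :: r) idx false 0 = getRespLoop r (idx + 1) false 0 by
                simp [getRespLoop, h1, h0, hone]]
          rw [ih]
          unfold altGen
          simp [oneIdxs, hone, ha1]

-- ===== VERDICT (by name: the statement is the Claim_ definition above) =====
theorem get_resp_spec : Claim_equal_get_resp := by
  intro answer _ _
  unfold Spec_get_resp get_resp get_resp_alt
  rw [getRespLoop_false]
  rfl
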